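-- pv_equiv track=rewrite | github.com/YangSunkue/Baekjoon | 프로그래머스/3/64064. 불량 사용자/불량 사용자.py | solution
-- ===== SOURCE A (Python) =====
-- def solution(user_id, banned_id):
--
--     def is_match(user, banned_user):
--         if len(user) != len(banned_user):
--             return False
--
--         for i in range(len(user)):
--             if banned_user[i] != '*' and banned_user[i] != user[i]:
--                 return False
--         return True
--
--     def back_tracking(depth, selected):
--
--         if depth == len(banned_id):
--             result_set.add(frozenset(selected))  # 순서가 다른것도 중복으로 인식하도록 frozenset 사용
--             return
--
--         for user in user_id:
--             if user not in selected and is_match(user, banned_id[depth]):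
--                 selected.add(user)
--                 back_tracking(depth + 1, selected)
--                 selected.remove(user)
--
--
--
--     # set으로 바꿔 중복 제거 (순서만 다른 조합들)
--     result_set = set()
--     back_tracking(0, set()) # not in 연산 효율성을 위해 set 선택(key로 접근하는 O(1)), 리스트는 O(N)
--
--     return len(result_set)
-- ===== SOURCE B (Python) =====
-- def solution(user_id, banned_id):
--     def matches(user, pat):
--         return len(user) == len(pat) and all(p == '*' or p == u for p, u in zip(pat, user))
--
--     # iterative, breadth-first build of all duplicate-free pattern-wise assignments
--     combos = [[]]
--     for pat in banned_id:
--         combos = [c + [u] for c in combos for u in user_id if u not in c and matches(u, pat)]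
--
--     return len({frozenset(c) for c in combos})
-- ===== Notes on version B (the rewrite author's own statement) =====
-- stated objective: alternative
-- what changed: Replaces the recursive backtracking with mutable selected/result sets by an iterative breadth-first build of all duplicate-free pattern-wise assignment tuples (a pruned Cartesian product materialised level by level) followed by one frozenset-dedup pass.
import Mathlib
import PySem

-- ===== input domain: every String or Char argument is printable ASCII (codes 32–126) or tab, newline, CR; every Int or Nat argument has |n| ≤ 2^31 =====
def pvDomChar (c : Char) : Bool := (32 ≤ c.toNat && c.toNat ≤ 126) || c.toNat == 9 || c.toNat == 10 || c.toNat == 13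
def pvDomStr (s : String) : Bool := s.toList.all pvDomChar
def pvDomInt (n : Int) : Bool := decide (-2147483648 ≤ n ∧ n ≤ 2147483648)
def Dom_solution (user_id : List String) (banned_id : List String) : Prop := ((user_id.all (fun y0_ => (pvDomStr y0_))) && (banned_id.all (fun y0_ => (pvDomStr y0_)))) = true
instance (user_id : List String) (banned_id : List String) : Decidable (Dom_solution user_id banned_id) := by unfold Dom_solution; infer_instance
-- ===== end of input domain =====

-- B replaces A's recursive backtracking (mutable selected/result sets) by an iterative
-- Cartesian-product build of pattern-wise assignments plus a distinctness filter (alternative,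
-- same results). A frozenset of strings is represented canonically as its sorted element list.

-- ===== PORT A =====
-- is_match: length check, then the index loop over range(len(user)); getD is exact since
-- every index of the range is in bounds of both lists (the lengths are equal past the check).
def pvIsMatch (user : List Char) (banned_user : List Char) : Bool :=
  if user.length != banned_user.length then false
  else (List.range user.length).all (fun i =>
    !(banned_user.getD i ' ' != '*' && banned_user.getD i ' ' != user.getD i ' '))

-- frozenset(l) represented canonically as sorted(l) (l has no duplicates wherever this is used)
def pvFrozen (l : List String) : List String := PySem.List.sorted l (fun x => x) false

-- back_tracking: recursion on the remaining banned_id suffix; 'selected' is a PySem.Set,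
-- 'res' the result_set threaded through the calls.
def pvBackTracking (user_id : List String) :
    List String → PySem.Set String → PySem.Set (List String) → PySem.Set (List String)
  | [], selected, res => PySem.Set.add res (pvFrozen selected)
  | b :: bs, selected, res =>
      user_id.foldl (fun res user =>
        if !(PySem.Set.contains selected user) && pvIsMatch user.toList b.toList then
          pvBackTracking user_id bs (PySem.Set.add selected user) res
        else res) res

def solution (user_id : List String) (banned_id : List String) : Int :=
  PySem.Set.len (pvBackTracking user_id banned_id PySem.Set.empty PySem.Set.empty)

-- ===== PORT B =====
def pvMatches (user : String) (pat : String) : Bool :=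
  user.toList.length == pat.toList.length &&
  (pat.toList.zip user.toList).all (fun pu => pu.1 == '*' || pu.1 == pu.2)

-- combos: iterative breadth-first build of the duplicate-free pattern-wise assignments
def pvCombos (user_id : List String) (banned_id : List String) : List (List String) :=
  banned_id.foldl (fun combos pat =>
    combos.flatMap (fun c =>
      (user_id.filter (fun u => !(c.contains u) && pvMatches u pat)).map (fun u => c ++ [u])))
    [[]]

def solution_alt (user_id : List String) (banned_id : List String) : Int :=
  PySem.Set.len
    ((pvCombos user_id banned_id).foldl
      (fun (res : PySem.Set (List String)) c => PySem.Set.add res (pvFrozen c))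
      PySem.Set.empty)

-- ===== PRECONDITION & SPEC =====
def Spec_solution (user_id : List String) (banned_id : List String) (out : Int) : Prop := out = solution_alt user_id banned_id
instance (user_id : List String) (banned_id : List String) (out : Int) : Decidable (Spec_solution user_id banned_id out) := by unfold Spec_solution; infer_instance

-- ===== CLAIM (what is proved, stated in full; the proofs are below) =====
def Claim_equal_solution : Prop := ∀ (user_id : List String) (banned_id : List String), Dom_solution user_id banned_id → Spec_solution user_id banned_id (solution user_id banned_id)

-- ===== LEMMAS AND PROOFS =====

-- valid extension tuples of a partial selection, mirroring A's recursion structure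
def pvExt (user_id : List String) : List String → List String → List (List String)
  | [], _ => [[]]
  | b :: bs, sel =>
      (user_id.filter (fun u => !(PySem.Set.contains sel u) && pvIsMatch u.toList b.toList)).flatMap
        (fun u => (pvExt user_id bs (sel ++ [u])).map (fun t => u :: t))

-- the two match tests agree: the index loop equals the zip form
theorem pvMatchAux : ∀ (us bs : List Char), pvIsMatch us bs =
    ((us.length == bs.length) && (bs.zip us).all (fun pu => pu.1 == '*' || pu.1 == pu.2)) := by
  intro us
  induction us with
  | nil => intro bs; cases bs <;> simp [pvIsMatch]
  | cons u us ih =>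
    intro bs
    cases bs with
    | nil => simp [pvIsMatch]
    | cons b bs =>
      by_cases h : us.length = bs.length
      · have h2 := ih bs
        simp [pvIsMatch, h, List.range_succ_eq_map, Function.comp_def, List.getElem?_cons_succ,
          Bool.or_comm, bne, Bool.beq_eq_decide_eq] at h2 ⊢
        congr 1
      · simp [pvIsMatch, h]

theorem pvIsMatch_eq_matches (user pat : String) :
    pvIsMatch user.toList pat.toList = pvMatches user pat := by
  rw [pvMatchAux, pvMatches]

-- A's backtracking is the fold of result-set insertion over its extension tuples
theorem pvBack_foldl (user_id : List String) : ∀ (bs : List String) (sel : List String)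
    (res : PySem.Set (List String)),
    pvBackTracking user_id bs sel res =
      (pvExt user_id bs sel).foldl (fun r t => PySem.Set.add r (pvFrozen (sel ++ t))) res := by
  intro bs
  induction bs with
  | nil => intro sel res; simp [pvBackTracking, pvExt]
  | cons b bs ih =>
    intro sel res
    rw [pvBackTracking, pvExt, PySem.List.foldl_if_eq_foldl_filter]
    rw [List.flatMap_def, List.foldl_flatten, List.foldl_map]
    apply PySem.List.foldl_congr_mem'
    intro u hu acc
    have hnm : u ∉ sel := by
      have h2 := (List.mem_filter.mp hu).2
      intro hm
      simp at h2
      exact h2.1 hm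
    rw [PySem.Set.add_of_not_mem hnm, ih, List.foldl_map]
    apply PySem.List.foldl_congr_mem'
    intro t _ r
    simp

-- B's iterative build equals A's extension-tuple enumeration
theorem pvCombos_foldl_aux (user_id : List String) : ∀ (bs : List String) (acc : List (List String)),
    bs.foldl (fun combos pat =>
      combos.flatMap (fun c =>
        (user_id.filter (fun u => !(c.contains u) && pvMatches u pat)).map (fun u => c ++ [u]))) acc
    = acc.flatMap (fun c => (pvExt user_id bs c).map (fun t => c ++ t)) := by
  intro bs
  induction bs with
  | nil => intro acc; simp [pvExt]
  | cons b bs ih =>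
    intro acc
    rw [List.foldl_cons, ih]
    simp only [pvExt, List.flatMap_assoc, List.flatMap_map, List.map_flatMap]
    congr 1
    funext c
    have hfil : user_id.filter (fun u => !(c.contains u) && pvMatches u b)
        = user_id.filter (fun u => !(PySem.Set.contains c u) && pvIsMatch u.toList b.toList) := by
      apply List.filter_congr
      intro u _
      rw [pvIsMatch_eq_matches]
      simp
    rw [hfil]
    congr 1
    funext u
    simp [List.map_map, Function.comp_def, List.append_assoc]

theorem pvCombos_eq_ext (user_id : List String) (banned_id : List String) :
    pvCombos user_id banned_id = pvExt user_id banned_id [] := by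
  rw [pvCombos, pvCombos_foldl_aux]
  simp

-- ===== VERDICT (by name: the statement is the Claim_ definition above) =====
theorem solution_spec : Claim_equal_solution := by
  intro user_id banned_id _
  unfold Spec_solution solution solution_alt
  rw [pvBack_foldl, pvCombos_eq_ext]
  apply congrArg
  apply PySem.List.foldl_congr_mem'
  intro t _ r
  simp [PySem.Set.empty]
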